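-- pv_equiv track=rewrite | github.com/tangjun5555/easy-rec-ext | samples/Tianchi_Taobao_UserBehavior/process_data.py | build_user_feature
-- ===== SOURCE A (Python) =====
-- behavior_type_enum = ["pv", "buy", "cart", "fav"]
--
-- max_seq_len = 20
--
-- def build_user_sequence_feature(history_behavior_list, need_behavior_type):
--     hist_item_id_list = []
--     hist_cate_id_list = []
--     hist_behavior_type_list = []
--
--     if not history_behavior_list:
--         history_behavior_list = []
--     for target_behavior in history_behavior_list:
--         hist_item_id_list.append(target_behavior[0])
--         hist_cate_id_list.append(target_behavior[1])
--         if need_behavior_type: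
--             hist_behavior_type_list.append(str(behavior_type_enum.index(target_behavior[2]) + 1))
--
--     while len(hist_item_id_list) < max_seq_len:
--         hist_item_id_list.append(str(-1))
--         hist_cate_id_list.append(str(-1))
--         if need_behavior_type:
--             hist_behavior_type_list.append(str(-1))
--
--     if need_behavior_type:
--         return ",".join([
--             "|".join(hist_item_id_list),
--             "|".join(hist_cate_id_list),
--             "|".join(hist_behavior_type_list),
--         ])
--     else:
--         return ",".join([
--             "|".join(hist_item_id_list),
--             "|".join(hist_cate_id_list),
--         ])
--
-- def build_user_feature(user_id, history_behavior_list):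
--     if not history_behavior_list:
--         history_behavior_list = []
--
--     target_history_behavior_list = [target_behavior for target_behavior in history_behavior_list
--                                     if target_behavior[2] == "pv"]
--     target_history_behavior_list = target_history_behavior_list[:max_seq_len]
--     user_clk_sequence_feature = build_user_sequence_feature(target_history_behavior_list, False)
--
--     target_history_behavior_list = [target_behavior for target_behavior in history_behavior_list if
--                                     target_behavior[2] != "pv"]
--     target_history_behavior_list = target_history_behavior_list[:max_seq_len]
--     user_buy_sequence_feature = build_user_sequence_feature(target_history_behavior_list, True)
--
--     return ",".join([
--         user_id,
--         user_clk_sequence_feature,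
--         user_buy_sequence_feature,
--     ])
-- ===== SOURCE B (Python) =====
-- behavior_type_enum = ["pv", "buy", "cart", "fav"]
--
-- max_seq_len = 20
--
--
-- def build_user_feature(user_id, history_behavior_list):
--     # Index-table approach: record the positions of click and non-click events
--     # once, then generate every column over a fixed range(max_seq_len) of slots,
--     # fetching the record for slot j through the position table (or '-1' when
--     # the table is exhausted).  No truncation and no padding loop ever happen.
--     hist = list(history_behavior_list or [])
--     pv_pos = [i for i, t in enumerate(hist) if t[2] == "pv"]
--     other_pos = [i for i, t in enumerate(hist) if t[2] != "pv"]
--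
--     def column(pos, f):
--         return "|".join(
--             f(hist[pos[j]]) if j < len(pos) else "-1"
--             for j in range(max_seq_len)
--         )
--
--     return ",".join([
--         user_id,
--         column(pv_pos, lambda t: t[0]),
--         column(pv_pos, lambda t: t[1]),
--         column(other_pos, lambda t: t[0]),
--         column(other_pos, lambda t: t[1]),
--         column(other_pos, lambda t: str(behavior_type_enum.index(t[2]) + 1)),
--     ])
-- ===== Notes on version B (the rewrite author's own statement) =====
-- stated objective: alternative
-- what changed: A filters the history twice, truncates each bucket and pads columns with a per-element while loop inside a helper; B never truncates or pads: it builds position-index tables for click and non-click records once, then generates every column over a fixed range(max_seq_len) of slots, fetching the record for slot j through the index table or emitting '-1' when the table is exhausted.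
-- outside the precondition, e.g. on build_user_feature('u', [('i', 'c', 'xx')]): A raises ValueError, B raises ValueError
import Mathlib
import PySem

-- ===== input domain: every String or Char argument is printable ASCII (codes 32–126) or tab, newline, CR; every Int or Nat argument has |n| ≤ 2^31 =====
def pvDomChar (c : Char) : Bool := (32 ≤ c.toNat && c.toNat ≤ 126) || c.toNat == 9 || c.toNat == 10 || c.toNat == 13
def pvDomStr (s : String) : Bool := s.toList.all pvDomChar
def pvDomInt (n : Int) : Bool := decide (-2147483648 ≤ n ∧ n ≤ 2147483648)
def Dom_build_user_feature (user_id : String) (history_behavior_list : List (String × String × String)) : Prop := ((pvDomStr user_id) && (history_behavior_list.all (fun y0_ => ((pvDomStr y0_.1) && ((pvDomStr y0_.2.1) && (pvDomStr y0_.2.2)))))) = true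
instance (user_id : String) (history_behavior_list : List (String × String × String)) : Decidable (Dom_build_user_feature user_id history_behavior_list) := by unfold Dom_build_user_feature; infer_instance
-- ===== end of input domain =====

-- B replaces A's filter/truncate/pad pipeline by a position-index table and a fixed
-- 20-slot generation loop per column (objective: alternative decomposition, same cost).

-- ===== PORT A =====
def behaviorTypeEnum : List String := ["pv", "buy", "cart", "fav"]

-- str(behavior_type_enum.index(x) + 1); list.index raises ValueError when x ∉ enum —
-- those inputs are excluded by Pre_; getD 0 is the total stand-in outside it.
def btIndexStr (x : String) : String :=
  PySem.Int.toStr ((((PySem.List.index? behaviorTypeEnum x).getD 0 : Nat) : Int) + 1)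

-- the 'while len(hist_item_id_list) < max_seq_len' padding loop, verbatim
def padWhile (item cate bt : List String) (need : Bool) :
    List String × List String × List String :=
  if item.length < 20 then
    padWhile (item ++ ["-1"]) (cate ++ ["-1"]) (if need then bt ++ ["-1"] else bt) need
  else (item, cate, bt)
termination_by 20 - item.length
decreasing_by simp_all; omega

def build_user_sequence_feature (history_behavior_list : List (String × String × String))
    (need_behavior_type : Bool) : String :=
  let acc := history_behavior_list.foldl
    (fun (acc : List String × List String × List String) t =>
      (acc.1 ++ [t.1], acc.2.1 ++ [t.2.1],
        if need_behavior_type then acc.2.2 ++ [btIndexStr t.2.2] else acc.2.2))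
    ([], [], [])
  let acc := padWhile acc.1 acc.2.1 acc.2.2 need_behavior_type
  if need_behavior_type then
    PySem.Str.join "," [PySem.Str.join "|" acc.1, PySem.Str.join "|" acc.2.1,
      PySem.Str.join "|" acc.2.2]
  else
    PySem.Str.join "," [PySem.Str.join "|" acc.1, PySem.Str.join "|" acc.2.1]

def build_user_feature (user_id : String) (history_behavior_list : List (String × String × String)) : String :=
  let clkList := (history_behavior_list.filter (fun t => t.2.2 == "pv")).take 20
  let user_clk_sequence_feature := build_user_sequence_feature clkList false
  let buyList := (history_behavior_list.filter (fun t => !(t.2.2 == "pv"))).take 20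
  let user_buy_sequence_feature := build_user_sequence_feature buyList true
  PySem.Str.join "," [user_id, user_clk_sequence_feature, user_buy_sequence_feature]

-- ===== PORT B =====
-- Source B's column(pos, f): a fixed range(20) of slots; slot j fetches hist[pos[j]] when the
-- position table still has a j-th entry, else '-1'.  Both indexings are in range by
-- construction (pos comes from enumerate(hist)), so the total getD / pyGetD are exact here.
def bColumn (hist : List (String × String × String)) (pos : List Int)
    (f : (String × String × String) → String) : String :=
  PySem.Str.join "|" ((List.range 20).map (fun j =>
    if j < pos.length then f (PySem.List.pyGetD hist (pos.getD j 0) ("", "", "")) else "-1"))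

def build_user_feature_alt (user_id : String) (history_behavior_list : List (String × String × String)) : String :=
  let hist := history_behavior_list
  let pv_pos := ((PySem.List.enumerate hist).filter (fun p => p.2.2.2 == "pv")).map (·.1)
  let other_pos := ((PySem.List.enumerate hist).filter (fun p => !(p.2.2.2 == "pv"))).map (·.1)
  PySem.Str.join "," [
    user_id,
    bColumn hist pv_pos (·.1),
    bColumn hist pv_pos (·.2.1),
    bColumn hist other_pos (·.1),
    bColumn hist other_pos (·.2.1),
    bColumn hist other_pos (fun t => btIndexStr t.2.2)]

-- ===== PRECONDITION & SPEC =====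
-- Pre_ excludes exactly the inputs on which A raises ValueError: a record among the
-- first 20 non-"pv" ones whose behavior type is not in behavior_type_enum.
def Pre_build_user_feature (user_id : String) (history_behavior_list : List (String × String × String)) : Prop :=
  ∀ t ∈ (history_behavior_list.filter (fun t => !(t.2.2 == "pv"))).take 20,
    t.2.2 ∈ behaviorTypeEnum
instance (user_id : String) (history_behavior_list : List (String × String × String)) : Decidable (Pre_build_user_feature user_id history_behavior_list) := by unfold Pre_build_user_feature; infer_instance

def pvWitness_build_user_feature : String × (List (String × String × String)) :=
  ("u1", [("i1", "c1", "pv"), ("i2", "c2", "buy")])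

def Spec_build_user_feature (user_id : String) (history_behavior_list : List (String × String × String)) (out : String) : Prop := out = build_user_feature_alt user_id history_behavior_list
instance (user_id : String) (history_behavior_list : List (String × String × String)) (out : String) : Decidable (Spec_build_user_feature user_id history_behavior_list out) := by unfold Spec_build_user_feature; infer_instance

-- ===== CLAIM (what is proved, stated in full; the proofs are below) =====
def Claim_equal_build_user_feature : Prop := ∀ (user_id : String) (history_behavior_list : List (String × String × String)), Dom_build_user_feature user_id history_behavior_list → Pre_build_user_feature user_id history_behavior_list → Spec_build_user_feature user_id history_behavior_list (build_user_feature user_id history_behavior_list)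

-- ===== LEMMAS AND PROOFS =====

-- A's column-building foldl produces the map-columns (need_behavior_type = false / true).
theorem foldl_columns_false (l : List (String × String × String)) (a b c : List String) :
    l.foldl (fun (acc : List String × List String × List String) t =>
        (acc.1 ++ [t.1], acc.2.1 ++ [t.2.1], acc.2.2)) (a, b, c)
      = (a ++ l.map (·.1), b ++ l.map (·.2.1), c) := by
  induction l generalizing a b c with
  | nil => simp
  | cons x xs ih => simp [List.foldl_cons, ih]

theorem foldl_columns_true (l : List (String × String × String)) (a b c : List String) :
    l.foldl (fun (acc : List String × List String × List String) t =>
        (acc.1 ++ [t.1], acc.2.1 ++ [t.2.1], acc.2.2 ++ [btIndexStr t.2.2])) (a, b, c)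
      = (a ++ l.map (·.1), b ++ l.map (·.2.1), c ++ l.map (fun t => btIndexStr t.2.2)) := by
  induction l generalizing a b c with
  | nil => simp
  | cons x xs ih => simp [List.foldl_cons, ih]

-- the while loop pads each list with (20 - item.length) copies of "-1"
theorem padWhile_eq (item cate bt : List String) (need : Bool) :
    padWhile item cate bt need
      = (item ++ List.replicate (20 - item.length) "-1",
         cate ++ List.replicate (20 - item.length) "-1",
         if need then bt ++ List.replicate (20 - item.length) "-1" else bt) := by
  by_cases h : item.length < 20
  · rw [padWhile]
    simp only [h, if_true]
    rw [padWhile_eq]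
    have hl : (item ++ ["-1"]).length = item.length + 1 := by simp
    have hn : 20 - item.length = (20 - (item.length + 1)) + 1 := by omega
    rw [hl, hn, List.replicate_succ]
    cases need <;> simp
  · rw [padWhile]
    simp only [h, if_false]
    have : 20 - item.length = 0 := by omega
    cases need <;> simp [this]
termination_by 20 - item.length
decreasing_by simp_all; omega

-- fetching through the position table of a filtered enumerate recovers the filtered records
theorem map_fetch_enum_filter (l : List (String × String × String))
    (pred : (String × String × String) → Bool)
    (f : (String × String × String) → String) :
    ((((PySem.List.enumerate l).filter (fun p => pred p.2)).map (·.1)).map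
        (fun i => f (PySem.List.pyGetD l i ("", "", ""))))
      = (l.filter pred).map f := by
  rw [List.map_map]
  have h1 : (((PySem.List.enumerate l).filter (fun p => pred p.2)).map
      (fun p => f (PySem.List.pyGetD l p.1 ("", "", ""))))
      = (((PySem.List.enumerate l).filter (fun p => pred p.2)).map (fun p => f p.2)) := by
    apply List.map_congr_left
    intro p hp
    have hp' : p ∈ PySem.List.enumerate l := List.mem_of_mem_filter hp
    rcases (PySem.List.mem_enumerate_iff l 0 p).1 hp' with ⟨k, hk, rfl⟩
    simp [PySem.List.pyGetD_natCast, List.getD_eq_getElem?_getD, hk]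
  have h2 : (((PySem.List.enumerate l).filter (fun p => pred p.2)).map (fun p => f p.2))
      = ((((PySem.List.enumerate l).map (·.2)).filter pred).map f) := by
    rw [List.filter_map, List.map_map]
    rfl
  exact h1.trans (h2.trans (by rw [PySem.List.map_snd_enumerate]))

-- the fixed 20-slot generation equals take-20-then-pad
theorem range_map_slots (n : Nat) (pos : List Int) (g : Int → String) :
    (List.range n).map (fun j => if j < pos.length then g (pos.getD j 0) else "-1")
      = (pos.take n).map g ++ List.replicate (n - pos.length) "-1" := by
  induction n with
  | zero => simp
  | succ m ih =>
    rw [List.range_succ, List.map_append, ih]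
    by_cases h : m < pos.length
    · have h1 : m + 1 - pos.length = 0 := by omega
      have h2 : m - pos.length = 0 := by omega
      have h3 : pos.take (m + 1) = pos.take m ++ [pos[m]] := by
        rw [List.take_add_one]
        simp [List.getElem?_eq_getElem h]
      have h5 : pos.getD m 0 = pos[m] := by
        rw [List.getD_eq_getElem?_getD, List.getElem?_eq_getElem h]; rfl
      rw [h1, h2, h3, List.replicate_zero, List.append_nil, List.append_nil,
        List.map_cons, List.map_nil, if_pos h, h5, List.map_append, List.map_cons, List.map_nil]
    · have h1 : pos.take (m + 1) = pos := List.take_of_length_le (by omega)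
      have h2 : pos.take m = pos := List.take_of_length_le (by omega)
      have h3 : m + 1 - pos.length = (m - pos.length) + 1 := by omega
      rw [h1, h2, h3, List.replicate_succ', List.map_cons, List.map_nil, if_neg h,
        List.append_assoc]

-- one B column equals the corresponding A column (take 20, map, pad to 20)
theorem bColumn_eq (l : List (String × String × String))
    (pred : (String × String × String) → Bool)
    (f : (String × String × String) → String) :
    bColumn l (((PySem.List.enumerate l).filter (fun p => pred p.2)).map (·.1)) f
      = PySem.Str.join "|"
          (((l.filter pred).take 20).map f
            ++ List.replicate (20 - ((l.filter pred).take 20).length) "-1") := by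
  unfold bColumn
  rw [range_map_slots 20 (((PySem.List.enumerate l).filter (fun p => pred p.2)).map (·.1))
    (fun i => f (PySem.List.pyGetD l i ("", "", "")))]
  have hlen : (((PySem.List.enumerate l).filter (fun p => pred p.2)).map (·.1)).length
      = (l.filter pred).length := by
    have := congrArg List.length (map_fetch_enum_filter l pred f)
    simpa using this
  have htake : ((((PySem.List.enumerate l).filter (fun p => pred p.2)).map (·.1)).take 20).map
        (fun i => f (PySem.List.pyGetD l i ("", "", "")))
      = ((l.filter pred).take 20).map f := by
    rw [List.map_take, map_fetch_enum_filter l pred f, ← List.map_take]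
  rw [htake]
  congr 2
  rw [List.length_take, hlen, Nat.min_def]
  split
  · congr 1
    omega
  · rfl

-- bColumn_eq at the two concrete predicates the port uses (definitional instances)
theorem bColumn_pv (l : List (String × String × String))
    (f : (String × String × String) → String) :
    bColumn l (((PySem.List.enumerate l).filter (fun p => p.2.2.2 == "pv")).map (·.1)) f
      = PySem.Str.join "|"
          (((l.filter (fun t => t.2.2 == "pv")).take 20).map f
            ++ List.replicate (20 - ((l.filter (fun t => t.2.2 == "pv")).take 20).length) "-1") :=
  bColumn_eq l (fun t => t.2.2 == "pv") f

theorem bColumn_other (l : List (String × String × String))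
    (f : (String × String × String) → String) :
    bColumn l (((PySem.List.enumerate l).filter (fun p => !(p.2.2.2 == "pv"))).map (·.1)) f
      = PySem.Str.join "|"
          (((l.filter (fun t => !(t.2.2 == "pv"))).take 20).map f
            ++ List.replicate (20 - ((l.filter (fun t => !(t.2.2 == "pv"))).take 20).length) "-1") :=
  bColumn_eq l (fun t => !(t.2.2 == "pv")) f

-- ===== VERDICT (by name: the statement is the Claim_ definition above) =====
theorem build_user_feature_spec : Claim_equal_build_user_feature := by
  intro user_id l _ _
  unfold Spec_build_user_feature
  unfold build_user_feature build_user_feature_alt build_user_sequence_feature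
  simp [bColumn_pv, bColumn_other, foldl_columns_false, foldl_columns_true,
    padWhile_eq, PySem.Str.join, PySem.Chars.join, List.intercalate, List.append_assoc]
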